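-- pv_equiv track=rewrite | github.com/ilius/starcal | scal2/cal_types/julian.py | jd_to
-- ===== SOURCE A (Python) =====
-- epoch = 1721058
--
-- def kal_s(m, p):
--  if m==13:
--      return 365
--  else:
--      t = (0, 31, 59, 90, 120, 151, 181, 212, 243, 273, 304, 334)
--      ## (31, 28, 31, 30, 31, 30, 31, 31, 30, 31, 30)
--      #m = (m-1)%12 + 1 ## for stability reasons
--      b = t[m-1]
--      if m<3:
--          b -= p
--      return b
--
-- def jd_to(jd):
--     ##wjd = ifloor(jd - 0.5) + 1
--     p1, q1 = divmod(jd-epoch, 1461)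
--     #if q1==0:## ??????????????????
--     #    return (4*p1, 1, 1)
--     #else:
--     if True:
--         p2, q2 = divmod(q1-1, 365)
--         y = 4*p1 + p2;
--         q = int(y%4==0)
--         m = 1;
--         while m<12 and q2+1 > kal_s(m+1, q):
--             m += 1
--         d = q2 + 1 - kal_s(m, q)
--         return (y, m, d)
-- ===== SOURCE B (Python) =====
-- epoch = 1721058
--
-- def jd_to(jd):
--     p1, q1 = divmod(jd - epoch, 1461)
--     p2, q2 = divmod(q1 - 1, 365)
--     y = 4 * p1 + p2
--     q = int(y % 4 == 0)
--     # month-start thresholds kal_s(m, q) for m = 2..12 (month 1 is never tested)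
--     thresholds = [31 - q, 59, 90, 120, 151, 181, 212, 243, 273, 304, 334]
--     # m = 1 + (number of thresholds strictly below q2+1), via binary search
--     lo, hi = 0, 11
--     while lo < hi:
--         mid = (lo + hi) // 2
--         if thresholds[mid] < q2 + 1:
--             lo = mid + 1
--         else:
--             hi = mid
--     m = 1 + lo
--     start = -q if m == 1 else thresholds[m - 2]
--     d = q2 + 1 - start
--     return (y, m, d)
-- ===== Notes on version B (the rewrite author's own statement) =====
-- stated objective: alternative
-- what changed: The incremental while-scan over month thresholds is replaced by a precomputed threshold list and a hand-written binary search (bisect_left) that counts thresholds strictly below q2+1.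
import Mathlib
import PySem

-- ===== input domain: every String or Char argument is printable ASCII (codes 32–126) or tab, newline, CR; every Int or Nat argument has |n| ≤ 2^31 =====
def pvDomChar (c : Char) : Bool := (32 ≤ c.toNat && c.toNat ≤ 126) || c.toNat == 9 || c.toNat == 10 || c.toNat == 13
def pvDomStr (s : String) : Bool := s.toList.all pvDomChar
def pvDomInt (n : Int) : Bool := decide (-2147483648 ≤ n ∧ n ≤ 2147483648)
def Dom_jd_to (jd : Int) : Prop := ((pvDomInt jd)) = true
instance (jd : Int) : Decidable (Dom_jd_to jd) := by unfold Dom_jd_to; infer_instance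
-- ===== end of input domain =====

-- B replaces A's linear while-scan over month thresholds by one binary search over the
-- precomputed threshold list (objective: alternative decomposition; same cost at n=12).

-- ===== PORT A =====
-- kal_s(m, p): t[m-1] is always in range at every call site (m ∈ 1..12), so getD 0 is never taken
def kal_s (m p : Int) : Int :=
  if m = 13 then (365 : Int)
  else
    let t : List Int := [0, 31, 59, 90, 120, 151, 181, 212, 243, 273, 304, 334]
    let b := (PySem.List.pyGet? t (m - 1)).getD 0
    if m < 3 then b - p else b

-- the 'while m<12 and q2+1 > kal_s(m+1,q): m += 1' loop; fuel 11 ≥ number of iterations (m<12 guard)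
def jd_to_loop (q2 q : Int) (m : Int) : Nat → Int
  | 0 => m
  | fuel + 1 =>
    if m < 12 ∧ q2 + 1 > kal_s (m + 1) q then jd_to_loop q2 q (m + 1) fuel else m

def jd_to (jd : Int) : Int × Int × Int :=
  let p1 := PySem.Int.floordiv (jd - 1721058) 1461
  let q1 := PySem.Int.mod (jd - 1721058) 1461
  let p2 := PySem.Int.floordiv (q1 - 1) 365
  let q2 := PySem.Int.mod (q1 - 1) 365
  let y := 4 * p1 + p2
  let q : Int := if PySem.Int.mod y 4 = 0 then 1 else 0
  let m := jd_to_loop q2 q 1 11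
  let d := q2 + 1 - kal_s m q
  (y, m, d)

-- ===== PORT B =====
-- Source B's hand-written binary search (lo, hi); fuel 11 ≥ hi - lo, which shrinks every iteration
def bisectLoop (ts : List Int) (x lo hi : Int) : Nat → Int
  | 0 => lo
  | fuel + 1 =>
    if lo < hi then
      let mid := PySem.Int.floordiv (lo + hi) 2
      if (PySem.List.pyGet? ts mid).getD 0 < x then bisectLoop ts x (mid + 1) hi fuel
      else bisectLoop ts x lo mid fuel
    else lo

def jd_to_alt (jd : Int) : Int × Int × Int :=
  let p1 := PySem.Int.floordiv (jd - 1721058) 1461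
  let q1 := PySem.Int.mod (jd - 1721058) 1461
  let p2 := PySem.Int.floordiv (q1 - 1) 365
  let q2 := PySem.Int.mod (q1 - 1) 365
  let y := 4 * p1 + p2
  let q : Int := if PySem.Int.mod y 4 = 0 then 1 else 0
  let thresholds : List Int := [31 - q, 59, 90, 120, 151, 181, 212, 243, 273, 304, 334]
  let lo := bisectLoop thresholds (q2 + 1) 0 11 11
  let m := 1 + lo
  let start : Int := if m = 1 then -q else (PySem.List.pyGet? thresholds (m - 2)).getD 0
  let d := q2 + 1 - start
  (y, m, d)

-- ===== PRECONDITION & SPEC =====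
def Spec_jd_to (jd : Int) (out : Int × Int × Int) : Prop := out = jd_to_alt jd
instance (jd : Int) (out : Int × Int × Int) : Decidable (Spec_jd_to jd out) := by unfold Spec_jd_to; infer_instance

-- ===== CLAIM (what is proved, stated in full; the proofs are below) =====
def Claim_equal_jd_to : Prop := ∀ (jd : Int), Dom_jd_to jd → Spec_jd_to jd (jd_to jd)

-- ===== LEMMAS AND PROOFS =====

-- the month/day computations of A and B agree for every q ∈ {0,1} and q2 ∈ [0,365)
set_option maxRecDepth 100000 in
theorem core_fin : ∀ (b : Fin 2) (n : Fin 365),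
    (jd_to_loop (n.val : Int) (b.val : Int) 1 11,
      (n.val : Int) + 1 - kal_s (jd_to_loop (n.val : Int) (b.val : Int) 1 11) (b.val : Int)) =
    (1 + bisectLoop [31 - (b.val : Int), 59, 90, 120, 151, 181, 212, 243, 273, 304, 334] ((n.val : Int) + 1) 0 11 11,
      (n.val : Int) + 1 -
        (if 1 + bisectLoop [31 - (b.val : Int), 59, 90, 120, 151, 181, 212, 243, 273, 304, 334] ((n.val : Int) + 1) 0 11 11 = 1
         then -(b.val : Int)
         else (PySem.List.pyGet? [31 - (b.val : Int), 59, 90, 120, 151, 181, 212, 243, 273, 304, 334]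
                (1 + bisectLoop [31 - (b.val : Int), 59, 90, 120, 151, 181, 212, 243, 273, 304, 334] ((n.val : Int) + 1) 0 11 11 - 2)).getD 0)) := by
  decide

theorem core_eq (q q2 : Int) (hq : q = 0 ∨ q = 1) (h0 : 0 ≤ q2) (h1 : q2 < 365) :
    (jd_to_loop q2 q 1 11, q2 + 1 - kal_s (jd_to_loop q2 q 1 11) q) =
    (1 + bisectLoop [31 - q, 59, 90, 120, 151, 181, 212, 243, 273, 304, 334] (q2 + 1) 0 11 11,
      q2 + 1 -
        (if 1 + bisectLoop [31 - q, 59, 90, 120, 151, 181, 212, 243, 273, 304, 334] (q2 + 1) 0 11 11 = 1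
         then -q
         else (PySem.List.pyGet? [31 - q, 59, 90, 120, 151, 181, 212, 243, 273, 304, 334]
                (1 + bisectLoop [31 - q, 59, 90, 120, 151, 181, 212, 243, 273, 304, 334] (q2 + 1) 0 11 11 - 2)).getD 0)) := by
  have hn : q2 = ((q2.toNat : Nat) : Int) := (Int.toNat_of_nonneg h0).symm
  have hnlt : q2.toNat < 365 := by omega
  have hb : ∃ bv : Nat, bv < 2 ∧ q = (bv : Int) := by
    rcases hq with h | h
    · exact ⟨0, by omega, by simp [h]⟩
    · exact ⟨1, by omega, by simp [h]⟩
  rcases hb with ⟨bv, hbv, rfl⟩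
  have := core_fin ⟨bv, hbv⟩ ⟨q2.toNat, hnlt⟩
  simpa [← hn] using this

-- ===== VERDICT (by name: the statement is the Claim_ definition above) =====
theorem jd_to_spec : Claim_equal_jd_to := by
  intro jd _
  have h0 : (0:Int) ≤ PySem.Int.mod (PySem.Int.mod (jd - 1721058) 1461 - 1) 365 :=
    PySem.Int.mod_nonneg _ (by norm_num)
  have h1 : PySem.Int.mod (PySem.Int.mod (jd - 1721058) 1461 - 1) 365 < 365 :=
    PySem.Int.mod_lt _ (by norm_num)
  have hq : (if PySem.Int.mod (4 * PySem.Int.floordiv (jd - 1721058) 1461 +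
        PySem.Int.floordiv (PySem.Int.mod (jd - 1721058) 1461 - 1) 365) 4 = 0 then (1:Int) else 0) = 0 ∨
      (if PySem.Int.mod (4 * PySem.Int.floordiv (jd - 1721058) 1461 +
        PySem.Int.floordiv (PySem.Int.mod (jd - 1721058) 1461 - 1) 365) 4 = 0 then (1:Int) else 0) = 1 := by
    split_ifs <;> simp
  have h := core_eq _ _ hq h0 h1
  show jd_to jd = jd_to_alt jd
  exact congrArg (Prod.mk (4 * PySem.Int.floordiv (jd - 1721058) 1461 +
    PySem.Int.floordiv (PySem.Int.mod (jd - 1721058) 1461 - 1) 365)) h
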